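-- pv_equiv track=rewrite | github.com/kd-zh/ESIPS | Code/LTS/ocr_canny.py | get_contour_points
-- ===== SOURCE A (Python) =====
-- def get_contour_points(contour) -> dict:
--     points = {}
--     for position in contour:
--         [[x, y]] = position
--         x_serial = points.get(y)
--         if x_serial is None:
--             x_serial = []
--             points[y] = x_serial
--         x_serial.append(x)
--     for k, v in points.items():
--         v.sort()
--     return points
-- ===== SOURCE B (Python) =====
-- def _insort(bucket, x):
--     """Return bucket (sorted ascending) with x inserted after any equal elements."""
--     for i, v in enumerate(bucket):
--         if x < v:
--             return bucket[:i] + [x] + bucket[i:]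
--     return bucket + [x]
--
--
-- def get_contour_points(contour) -> dict:
--     points = {}
--     for position in contour:
--         [[x, y]] = position
--         points[y] = _insort(points.get(y, []), x)
--     return points
-- ===== Notes on version B (the rewrite author's own statement) =====
-- stated objective: alternative
-- what changed: B keeps each y-bucket sorted as it is built, inserting every x at its ordered position in one pass, instead of A's append-then-sort-every-bucket second loop.
import Mathlib
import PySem

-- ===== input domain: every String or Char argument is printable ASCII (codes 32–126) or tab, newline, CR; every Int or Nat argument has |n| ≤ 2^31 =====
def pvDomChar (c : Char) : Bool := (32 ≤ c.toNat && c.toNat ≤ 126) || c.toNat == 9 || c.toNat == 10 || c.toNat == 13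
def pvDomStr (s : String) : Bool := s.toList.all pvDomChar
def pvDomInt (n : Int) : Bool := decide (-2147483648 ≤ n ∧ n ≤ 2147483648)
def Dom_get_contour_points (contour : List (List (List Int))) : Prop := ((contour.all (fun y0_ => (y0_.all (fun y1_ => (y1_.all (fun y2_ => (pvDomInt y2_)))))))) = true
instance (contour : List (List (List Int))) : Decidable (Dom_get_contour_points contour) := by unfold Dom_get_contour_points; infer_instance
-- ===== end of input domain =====

-- B keeps each bucket sorted while it is built (ordered insertion), removing A's final
-- sort-every-bucket pass; same dict key order, same return value (alternative decomposition).

-- ===== PORT A =====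
-- one iteration of A's first loop: unpack [[x, y]] = position, append x to points[y]
def pvStepA (pts : PySem.Dict Int (List Int)) (pos : List (List Int)) : PySem.Dict Int (List Int) :=
  match pos with
  | [[x, y]] =>
    match pts.get? y with
    | none => pts.insert y [x]          -- x_serial = []; points[y] = x_serial; append
    | some xs => pts.insert y (xs ++ [x])
  | _ => pts                            -- Python raises ValueError here; excluded by Pre_

def get_contour_points (contour : List (List (List Int))) : List (Int × List Int) :=
  let points := contour.foldl pvStepA PySem.Dict.empty
  -- second loop: for k, v in points.items(): v.sort()
  points.items.map (fun kv => (kv.1, PySem.List.sorted kv.2 (fun z => z) false))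

-- ===== PORT B =====
-- Source B's _insort: insert x before the first element it is strictly less than
def pvInsort (bucket : List Int) (x : Int) : List Int :=
  match bucket with
  | [] => [x]
  | v :: rest => if x < v then x :: v :: rest else v :: pvInsort rest x

def pvStepB (pts : PySem.Dict Int (List Int)) (pos : List (List Int)) : PySem.Dict Int (List Int) :=
  match pos with
  | [[x, y]] => pts.insert y (pvInsort (pts.getD y []) x)
  | _ => pts                            -- Python raises ValueError here; excluded by Pre_

def get_contour_points_alt (contour : List (List (List Int))) : List (Int × List Int) :=
  (contour.foldl pvStepB PySem.Dict.empty).items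

-- ===== PRECONDITION & SPEC =====
-- Pre_ excludes exactly the inputs where the unpacking '[[x, y]] = position' raises ValueError:
-- every position must be a single pair.
def Pre_get_contour_points (contour : List (List (List Int))) : Prop :=
  ∀ p ∈ contour, p.length = 1 ∧ ∀ q ∈ p, q.length = 2
instance (contour : List (List (List Int))) : Decidable (Pre_get_contour_points contour) := by unfold Pre_get_contour_points; infer_instance

def pvWitness_get_contour_points : List (List (List Int)) := [[[3, 1]], [[2, 1]], [[5, 0]], [[2, 1]]]

def Spec_get_contour_points (contour : List (List (List Int))) (out : List (Int × List Int)) : Prop := out = get_contour_points_alt contour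
instance (contour : List (List (List Int))) (out : List (Int × List Int)) : Decidable (Spec_get_contour_points contour out) := by unfold Spec_get_contour_points; infer_instance

-- ===== CLAIM (what is proved, stated in full; the proofs are below) =====
def Claim_equal_get_contour_points : Prop := ∀ (contour : List (List (List Int))), Dom_get_contour_points contour → Pre_get_contour_points contour → Spec_get_contour_points contour (get_contour_points contour)

-- ===== LEMMAS AND PROOFS =====

-- sorting a pair's bucket: the relation between B's dict entries and A's
def pvSortPair (p : Int × List Int) : Int × List Int :=
  (p.1, PySem.List.sorted p.2 (fun z => z) false)

lemma pvInsort_eq_insertBy (l : List Int) (x : Int) :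
    pvInsort l x = PySem.List.insertBy (fun a b => decide (a < b)) x l := by
  induction l with
  | nil => rfl
  | cons v rest ih => simp [pvInsort, PySem.List.insertBy, ih]

lemma pvSorted_append_singleton (v : List Int) (x : Int) :
    PySem.List.sorted (v ++ [x]) (fun z => z) false
      = pvInsort (PySem.List.sorted v (fun z => z) false) x := by
  rw [pvInsort_eq_insertBy, PySem.List.sorted_eq_foldl_insertBy,
      PySem.List.sorted_eq_foldl_insertBy, List.foldl_append]
  rfl

lemma pvGet?_rel (d1 d2 : PySem.Dict Int (List Int))
    (h : d2.items = d1.items.map pvSortPair) (y : Int) :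
    d2.get? y = (d1.get? y).map (fun v => PySem.List.sorted v (fun z => z) false) := by
  simp [PySem.Dict.get?, h, List.find?_map, pvSortPair, Function.comp_def, Option.map_map]

lemma pvContains_rel (d1 d2 : PySem.Dict Int (List Int))
    (h : d2.items = d1.items.map pvSortPair) (y : Int) :
    d2.contains y = d1.contains y := by
  rw [PySem.Dict.contains_eq_isSome_get?, PySem.Dict.contains_eq_isSome_get?,
      pvGet?_rel d1 d2 h y]
  cases d1.get? y <;> rfl

lemma pvStep_rel (d1 d2 : PySem.Dict Int (List Int)) (pos : List (List Int))
    (h : d2.items = d1.items.map pvSortPair) :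
    (pvStepB d2 pos).items = (pvStepA d1 pos).items.map pvSortPair := by
  match pos with
  | [[x, y]] =>
    simp only [pvStepA, pvStepB]
    cases hg : d1.get? y with
    | none =>
      have hc1 : d1.contains y = false := by
        rw [PySem.Dict.contains_eq_isSome_get?, hg]; rfl
      have hc2 : d2.contains y = false := by rw [pvContains_rel d1 d2 h y]; exact hc1
      have hd : d2.getD y [] = [] := by
        simp [PySem.Dict.getD, pvGet?_rel d1 d2 h y, hg]
      rw [hd, PySem.Dict.items_insert_of_not_contains d2 _ hc2,
          PySem.Dict.items_insert_of_not_contains d1 _ hc1, h]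
      simp only [List.map_append, List.map_cons, List.map_nil]; rfl
    | some v =>
      have hc1 : d1.contains y = true := by
        rw [PySem.Dict.contains_eq_isSome_get?, hg]; rfl
      have hc2 : d2.contains y = true := by rw [pvContains_rel d1 d2 h y]; exact hc1
      have hd : d2.getD y [] = PySem.List.sorted v (fun z => z) false := by
        simp [PySem.Dict.getD, pvGet?_rel d1 d2 h y, hg]
      rw [hd, PySem.Dict.items_insert_of_contains d2 _ hc2,
          PySem.Dict.items_insert_of_contains d1 _ hc1, h]
      simp only [List.map_map]
      refine List.map_congr_left (fun p _ => ?_)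
      simp only [Function.comp_apply, pvSortPair]
      by_cases hp : p.1 = y
      · simp [hp, ← pvSorted_append_singleton]
      · simp [hp]
  | [] => exact h
  | [[]] => simpa [pvStepA, pvStepB] using h
  | [[_]] => simpa [pvStepA, pvStepB] using h
  | [(_ :: _ :: _ :: _)] => simpa [pvStepA, pvStepB] using h
  | _ :: _ :: _ => simpa [pvStepA, pvStepB] using h

lemma pvFold_rel (l : List (List (List Int))) (d1 d2 : PySem.Dict Int (List Int))
    (h : d2.items = d1.items.map pvSortPair) :
    (l.foldl pvStepB d2).items = (l.foldl pvStepA d1).items.map pvSortPair := by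
  induction l generalizing d1 d2 with
  | nil => exact h
  | cons pos rest ih =>
    exact ih (pvStepA d1 pos) (pvStepB d2 pos) (pvStep_rel d1 d2 pos h)

-- ===== VERDICT (by name: the statement is the Claim_ definition above) =====
theorem get_contour_points_spec : Claim_equal_get_contour_points := by
  intro contour _ _
  show _ = _
  rw [get_contour_points_alt, get_contour_points]
  exact (pvFold_rel contour PySem.Dict.empty PySem.Dict.empty rfl).symm
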